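-- pv_equiv track=rewrite | github.com/copperdogma/onward-to-the-unknown-website | scripts/methodology_graph.py | summarize_body
-- ===== SOURCE A (Python) =====
-- def summarize_body(lines: list[str]) -> str:
--     paragraphs: list[str] = []
--     current: list[str] = []
--     for line in lines:
--         if line.startswith("#"):
--             continue
--         stripped = line.strip()
--         if not stripped:
--             if current:
--                 paragraphs.append(" ".join(current).strip())
--                 current = []
--             continue
--         current.append(stripped)
--     if current:
--         paragraphs.append(" ".join(current).strip())
--     return paragraphs[0] if paragraphs else ""
-- ===== SOURCE B (Python) =====
-- def summarize_body(lines: list[str]) -> str: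
--     # Phase 1: drop comment lines entirely (they never break a paragraph).
--     content = [l for l in lines if not l.startswith("#")]
--     # Phase 2: skip leading blank lines.
--     while content and not content[0].strip():
--         content.pop(0)
--     # Phase 3: collect the first run of non-blank lines.
--     para: list[str] = []
--     for l in content:
--         if not l.strip():
--             break
--         para.append(l.strip())
--     return " ".join(para).strip()
-- ===== Notes on version B (the rewrite author's own statement) =====
-- stated objective: simpler
-- what changed: B replaces A's fused accumulate-all-paragraphs loop (paragraphs/current state, returning paragraphs[0]) with three short phases that never build later paragraphs: filter out comment lines, skip leading blanks, then take and join only the first run of non-blank lines.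
import Mathlib
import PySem

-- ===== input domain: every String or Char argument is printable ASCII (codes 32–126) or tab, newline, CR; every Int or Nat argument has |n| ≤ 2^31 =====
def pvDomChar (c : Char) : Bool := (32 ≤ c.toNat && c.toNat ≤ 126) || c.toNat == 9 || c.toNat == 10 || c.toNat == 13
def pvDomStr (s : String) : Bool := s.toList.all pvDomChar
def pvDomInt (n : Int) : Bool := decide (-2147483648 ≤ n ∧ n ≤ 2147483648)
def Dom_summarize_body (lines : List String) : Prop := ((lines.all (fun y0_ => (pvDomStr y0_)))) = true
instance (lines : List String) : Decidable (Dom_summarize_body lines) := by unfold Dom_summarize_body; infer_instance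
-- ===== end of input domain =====

-- B restructures A's single fused loop (paragraphs/current accumulators, returning paragraphs[0])
-- into three short phases — filter comments, skip leading blanks, take the first non-blank run —
-- objective: simpler.

-- ===== PORT A =====
-- one loop iteration over (paragraphs, current)
def sbStep (st : List String × List String) (line : String) : List String × List String :=
  if PySem.Str.startswith line "#" then st
  else
    let stripped := PySem.Str.strip line
    if stripped = "" then
      if st.2.isEmpty then st
      else (st.1 ++ [PySem.Str.strip (PySem.Str.join " " st.2)], [])
    else (st.1, st.2 ++ [stripped])

def summarize_body (lines : List String) : String :=
  let st := lines.foldl sbStep ([], [])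
  let paragraphs :=
    if st.2.isEmpty then st.1
    else st.1 ++ [PySem.Str.strip (PySem.Str.join " " st.2)]
  paragraphs.headD ""

-- ===== PORT B =====
-- phase 2: while content and not content[0].strip(): content.pop(0)
def sbSkipBlank : List String → List String
  | [] => []
  | l :: rest => if PySem.Str.strip l = "" then sbSkipBlank rest else l :: rest

-- phase 3: for l in content: if not l.strip(): break; para.append(l.strip())
def sbFirstPara : List String → List String
  | [] => []
  | l :: rest =>
    if PySem.Str.strip l = "" then []
    else PySem.Str.strip l :: sbFirstPara rest

def summarize_body_alt (lines : List String) : String :=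
  let content := lines.filter (fun l => !(PySem.Str.startswith l "#"))
  let para := sbFirstPara (sbSkipBlank content)
  PySem.Str.strip (PySem.Str.join " " para)

-- ===== PRECONDITION & SPEC =====
def Spec_summarize_body (lines : List String) (out : String) : Prop := out = summarize_body_alt lines
instance (lines : List String) (out : String) : Decidable (Spec_summarize_body lines out) := by unfold Spec_summarize_body; infer_instance

-- ===== CLAIM (what is proved, stated in full; the proofs are below) =====
def Claim_equal_summarize_body : Prop := ∀ (lines : List String), Dom_summarize_body lines → Spec_summarize_body lines (summarize_body lines)

-- ===== LEMMAS AND PROOFS =====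

-- A's answer from an arbitrary intermediate loop state (proof helper)
def sbAns (ps cur : List String) (lines : List String) : String :=
  let st := lines.foldl sbStep (ps, cur)
  (if st.2.isEmpty then st.1
   else st.1 ++ [PySem.Str.strip (PySem.Str.join " " st.2)]).headD ""

lemma headD_append_singleton (ps : List String) (a d : String) :
    (ps ++ [a]).headD d = ps.headD a := by
  cases ps <;> simp

-- invariant: A's eventual answer from state (ps, cur) in terms of B's phases
lemma sbAns_eq (lines : List String) : ∀ ps cur : List String,
    sbAns ps cur lines =
      ps.headD
        (if cur.isEmpty then
          PySem.Str.strip (PySem.Str.join " "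
            (sbFirstPara (sbSkipBlank (lines.filter (fun l => !(PySem.Str.startswith l "#"))))))
        else
          PySem.Str.strip (PySem.Str.join " "
            (cur ++ sbFirstPara (lines.filter (fun l => !(PySem.Str.startswith l "#")))))) := by
  induction lines with
  | nil =>
    intro ps cur
    have hs : PySem.Str.strip "" = "" := by decide
    cases cur with
    | nil => simp [sbAns, sbFirstPara, sbSkipBlank, PySem.Str.join, hs]
    | cons c cs => simp [sbAns, sbFirstPara]
  | cons line rest ih =>
    intro ps cur
    by_cases hc : PySem.Chars.startswith line.toList ['#'] = true
    · have h1 : sbAns ps cur (line :: rest) = sbAns ps cur rest := by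
        simp [sbAns, List.foldl_cons, sbStep, hc]
      rw [h1, ih, List.filter_cons]
      simp [hc]
    · rw [List.filter_cons]
      by_cases hb : PySem.Str.strip line = ""
      · cases cur with
        | nil =>
          have h1 : sbAns ps [] (line :: rest) = sbAns ps [] rest := by
            simp [sbAns, List.foldl_cons, sbStep, hc, hb]
          rw [h1, ih]
          simp [hc, sbSkipBlank, hb]
        | cons c cs =>
          have h1 : sbAns ps (c :: cs) (line :: rest)
              = sbAns (ps ++ [PySem.Str.strip (PySem.Str.join " " (c :: cs))]) [] rest := by
            simp [sbAns, List.foldl_cons, sbStep, hc, hb]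
          rw [h1, ih, headD_append_singleton]
          simp [hc, sbFirstPara, hb]
      · have h1 : sbAns ps cur (line :: rest)
            = sbAns ps (cur ++ [PySem.Str.strip line]) rest := by
          simp [sbAns, List.foldl_cons, sbStep, hc, hb]
        rw [h1, ih]
        cases cur with
        | nil => simp [hc, sbSkipBlank, sbFirstPara, hb]
        | cons c cs => simp [hc, sbFirstPara, hb]

-- ===== VERDICT (by name: the statement is the Claim_ definition above) =====
theorem summarize_body_spec : Claim_equal_summarize_body := by
  intro lines _
  show summarize_body lines = summarize_body_alt lines
  have h := sbAns_eq lines [] []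
  simpa [sbAns, summarize_body, summarize_body_alt] using h
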